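-- pv_equiv track=rewrite | github.com/ligon/sucoder | sucoder/mirror.py | _sanitize_task_name
-- ===== SOURCE A (Python) =====
-- class MirrorError(RuntimeError):
--     """Raised when mirror operations fail."""
--
-- def _sanitize_task_name(raw: str) -> str:
--     """Sanitize a task name for use in a git branch."""
--     allowed = "abcdefghijklmnopqrstuvwxyz0123456789-"
--     cleaned = []
--     for char in raw.lower():
--         if char in allowed:
--             cleaned.append(char)
--         elif char.isalnum():
--             cleaned.append(char.lower())
--         else:
--             cleaned.append("-")
--
--     sanitized = "".join(cleaned).strip("-")
--     sanitized = "-".join(filter(None, sanitized.split("-")))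
--     if not sanitized:
--         raise MirrorError("Task name produces an empty branch component after sanitization.")
--     return sanitized
-- ===== SOURCE B (Python) =====
-- class MirrorError(RuntimeError):
--     """Raised when mirror operations fail."""
--
-- def _sanitize_task_name(raw: str) -> str:
--     """Sanitize a task name for use in a git branch (single-pass run grouping)."""
--     tokens = []
--     buf = []
--     for ch in raw.lower():
--         if ch.isalnum():
--             buf.append(ch)
--         elif buf:
--             tokens.append("".join(buf))
--             buf = []
--     if buf:
--         tokens.append("".join(buf))
--     result = "-".join(tokens)
--     if not result:
--         raise MirrorError("Task name produces an empty branch component after sanitization.")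
--     return result
-- ===== Notes on version B (the rewrite author's own statement) =====
-- stated objective: simpler
-- what changed: B replaces A's char-to-dash mapping followed by strip('-'), split('-'), filter and re-join with a single pass that groups consecutive alphanumeric characters into tokens and joins them with '-'.
-- outside the precondition, e.g. on _sanitize_task_name('-'): A raises MirrorError, B raises MirrorError
import Mathlib
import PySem

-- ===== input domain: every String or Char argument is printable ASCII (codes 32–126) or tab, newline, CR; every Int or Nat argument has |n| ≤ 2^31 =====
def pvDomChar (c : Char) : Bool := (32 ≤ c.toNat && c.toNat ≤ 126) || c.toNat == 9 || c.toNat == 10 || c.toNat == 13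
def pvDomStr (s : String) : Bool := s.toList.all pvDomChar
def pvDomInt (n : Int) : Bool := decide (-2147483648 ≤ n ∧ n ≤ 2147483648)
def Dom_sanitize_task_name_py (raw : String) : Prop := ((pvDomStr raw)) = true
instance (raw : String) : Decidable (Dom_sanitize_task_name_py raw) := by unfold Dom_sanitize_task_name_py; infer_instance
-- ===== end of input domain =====

-- B replaces A's map-to-dashes + strip + split + filter + join pipeline by one pass that
-- groups maximal alphanumeric runs and joins them with '-' (objective: simpler).

-- ===== PORT A =====
def sanitize_task_name_py (raw : String) : String :=
  let allowed : List Char := "abcdefghijklmnopqrstuvwxyz0123456789-".toList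
  let cleaned : List Char :=
    (PySem.Chars.lower raw.toList).foldl
      (fun acc char =>
        if PySem.Chars.isIn [char] allowed then acc ++ [char]
        else if PySem.Chars.isalnum char then acc ++ [PySem.Chars.lowerChar char]
        else acc ++ ['-']) []
  let sanitized := PySem.Chars.stripChars cleaned ['-']
  let sanitized2 := PySem.Chars.join ['-']
      ((PySem.Chars.splitOn sanitized ['-']).filter (fun p => !p.isEmpty))
  String.mk sanitized2

-- ===== PORT B =====
def sanitize_task_name_py_alt (raw : String) : String :=
  let st := (PySem.Chars.lower raw.toList).foldl
      (fun (st : List (List Char) × List Char) ch =>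
        if PySem.Chars.isalnum ch then (st.1, st.2 ++ [ch])
        else if st.2.isEmpty then st else (st.1 ++ [st.2], ([] : List Char)))
      ([], [])
  let tokens := if st.2.isEmpty then st.1 else st.1 ++ [st.2]
  String.mk (PySem.Chars.join ['-'] tokens)

-- ===== PRECONDITION & SPEC =====
-- Pre_ excludes exactly the inputs on which A raises MirrorError: strings with no
-- alphanumeric character, whose sanitized branch component would be empty.
def Pre_sanitize_task_name_py (raw : String) : Prop :=
  raw.toList.any PySem.Chars.isalnum = true
instance (raw : String) : Decidable (Pre_sanitize_task_name_py raw) := by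
  unfold Pre_sanitize_task_name_py; infer_instance

def pvWitness_sanitize_task_name_py : String := "My Task (v2)!"

def Spec_sanitize_task_name_py (raw : String) (out : String) : Prop := out = sanitize_task_name_py_alt raw
instance (raw : String) (out : String) : Decidable (Spec_sanitize_task_name_py raw out) := by unfold Spec_sanitize_task_name_py; infer_instance

-- ===== CLAIM (what is proved, stated in full; the proofs are below) =====
def Claim_equal_sanitize_task_name_py : Prop := ∀ (raw : String), Dom_sanitize_task_name_py raw → Pre_sanitize_task_name_py raw → Spec_sanitize_task_name_py raw (sanitize_task_name_py raw)

-- ===== LEMMAS AND PROOFS =====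

-- character map actually applied by A on the lowered input
def pvCharA (c : Char) : Char :=
  if PySem.Chars.isIn [c] ("abcdefghijklmnopqrstuvwxyz0123456789-".toList) then c
  else if PySem.Chars.isalnum c then PySem.Chars.lowerChar c
  else '-'

-- the same map, in the form the proof uses: alnum chars stay, everything else becomes '-'
def pvG (c : Char) : Char := if PySem.Chars.isalnum c then c else '-'

-- structural model of s.split('-')
def pvSplitP : List Char → List (List Char)
  | [] => [[]]
  | c :: rest => if c = '-' then [] :: pvSplitP rest
      else (c :: (pvSplitP rest).headI) :: (pvSplitP rest).tail

-- structural model of B's run grouping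
def pvRuns (buf : List Char) : List Char → List (List Char)
  | [] => if buf.isEmpty then [] else [buf]
  | c :: cs => if PySem.Chars.isalnum c then pvRuns (buf ++ [c]) cs
      else (if buf.isEmpty then [] else [buf]) ++ pvRuns [] cs

theorem pvSplitP_ne_nil (l : List Char) : pvSplitP l ≠ [] := by
  cases l with
  | nil => simp [pvSplitP]
  | cons c rest => simp only [pvSplitP]; split <;> simp

theorem pvSplitP_cons_head_tail (l : List Char) :
    pvSplitP l = (pvSplitP l).headI :: (pvSplitP l).tail := by
  cases h : pvSplitP l with
  | nil => exact absurd h (pvSplitP_ne_nil l)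
  | cons a t => simp

theorem go_spec : ∀ (fuel : Nat) (l cur : List Char) (accs : List (List Char)),
    l.length ≤ fuel →
    PySem.Chars.splitOn.go ['-'] fuel l cur accs =
      accs.reverse ++ (cur.reverse ++ (pvSplitP l).headI) :: (pvSplitP l).tail := by
  intro fuel
  induction fuel with
  | zero =>
    intro l cur accs h
    have : l = [] := List.length_eq_zero_iff.mp (Nat.le_zero.mp h)
    subst this
    rw [PySem.Chars.splitOn.go]
    simp [pvSplitP]
  | succ n ih =>
    intro l cur accs h
    cases l with
    | nil => rw [PySem.Chars.splitOn.go]; simp [pvSplitP]; omega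
    | cons c rest =>
      rw [PySem.Chars.splitOn.go]
      by_cases hc : c = '-'
      · subst hc
        have hpre : List.isPrefixOf ['-'] ('-' :: rest) = true := by
          simp [List.isPrefixOf]
        simp only [hpre, if_pos]
        rw [ih]
        · simp [pvSplitP]
          rw [← pvSplitP_cons_head_tail rest]
        · simpa using Nat.le_of_succ_le_succ (by simpa using h)
      · have hpre : List.isPrefixOf ['-'] (c :: rest) = false := by
          simp [List.isPrefixOf]
          intro hh; exact absurd hh.symm hc
        simp only [hpre]
        rw [if_neg (by simp)]
        rw [ih]
        · simp [pvSplitP, hc]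
        · simpa using Nat.le_of_succ_le_succ (by simpa using h)

theorem splitOn_eq_pvSplitP (s : List Char) :
    PySem.Chars.splitOn s ['-'] = pvSplitP s := by
  rw [PySem.Chars.splitOn, go_spec (s.length + 1) s [] [] (by omega)]
  simpa using (pvSplitP_cons_head_tail s).symm

theorem pvSplitP_append_dash (u : List Char) :
    pvSplitP (u ++ ['-']) = pvSplitP u ++ [[]] := by
  induction u with
  | nil => simp [pvSplitP]
  | cons c u ih =>
    by_cases hc : c = '-'
    · subst hc; simp [pvSplitP, ih]
    · simp only [List.cons_append, pvSplitP, if_neg hc, ih]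
      rw [pvSplitP_cons_head_tail u]
      simp

theorem filter_splitP_dropWhile (s : List Char) :
    (pvSplitP (List.dropWhile (fun c => List.contains ['-'] c) s)).filter (fun p => !p.isEmpty)
      = (pvSplitP s).filter (fun p => !p.isEmpty) := by
  induction s with
  | nil => rfl
  | cons c s ih =>
    by_cases hc : c = '-'
    · subst hc
      rw [List.dropWhile_cons_of_pos (by simp)]
      rw [ih]
      simp [pvSplitP]
    · rw [List.dropWhile_cons_of_neg (by simp [hc])]

theorem filter_splitP_rstrip (t : List Char) :
    (pvSplitP ((List.dropWhile (fun c => List.contains ['-'] c) t.reverse).reverse)).filter (fun p => !p.isEmpty)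
      = (pvSplitP t).filter (fun p => !p.isEmpty) := by
  induction t using List.reverseRecOn with
  | nil => rfl
  | append_singleton u c ih =>
    by_cases hc : c = '-'
    · subst hc
      rw [List.reverse_append]
      simp only [List.reverse_singleton, List.singleton_append]
      rw [List.dropWhile_cons_of_pos (by simp)]
      rw [ih, pvSplitP_append_dash]
      simp
    · rw [List.reverse_append]
      simp only [List.reverse_singleton, List.singleton_append]
      rw [List.dropWhile_cons_of_neg (by simp [hc])]
      simp

theorem filter_splitP_strip (s : List Char) :
    (pvSplitP (PySem.Chars.stripChars s ['-'])).filter (fun p => !p.isEmpty)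
      = (pvSplitP s).filter (fun p => !p.isEmpty) := by
  rw [PySem.Chars.stripChars]
  rw [filter_splitP_rstrip (List.dropWhile (fun c => List.contains ['-'] c) s)]
  exact filter_splitP_dropWhile s

theorem isalnum_ne_dash {c : Char} (h : PySem.Chars.isalnum c = true) : ¬ (c = '-') := by
  intro hc; subst hc; exact absurd h (by decide)

theorem pvRuns_eq_filter (cs : List Char) : ∀ buf,
    pvRuns buf cs =
      ((buf ++ (pvSplitP (cs.map pvG)).headI) :: (pvSplitP (cs.map pvG)).tail).filter
        (fun p => !p.isEmpty) := by
  induction cs with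
  | nil =>
    intro buf
    simp [pvRuns, pvSplitP]
    cases buf <;> simp
  | cons c cs ih =>
    intro buf
    by_cases hc : PySem.Chars.isalnum c = true
    · have hG : pvG c = c := by simp [pvG, hc]
      simp only [pvRuns, hc, if_pos, List.map_cons, hG, pvSplitP,
        if_neg (isalnum_ne_dash hc)]
      rw [ih (buf ++ [c])]
      simp
    · have hc' : PySem.Chars.isalnum c = false := by
        cases h : PySem.Chars.isalnum c
        · rfl
        · exact absurd h hc
      have hG : pvG c = '-' := by simp [pvG, hc']
      simp only [pvRuns, hc', List.map_cons, hG, pvSplitP,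
        Bool.false_eq_true, if_false]
      rw [ih []]
      rw [pvSplitP_cons_head_tail (cs.map pvG)]
      simp only [List.nil_append, List.filter_cons]
      by_cases hh : (pvSplitP (List.map pvG cs)).headI = [] <;>
        cases buf <;> simp [hh]

theorem pvRuns_eq (cs : List Char) :
    pvRuns [] cs = (pvSplitP (cs.map pvG)).filter (fun p => !p.isEmpty) := by
  rw [pvRuns_eq_filter cs []]
  simp only [List.nil_append]
  rw [← pvSplitP_cons_head_tail (cs.map pvG)]

-- every ASCII character is mapped the same way by pvCharA and pvG after lowering
set_option maxRecDepth 100000 in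
theorem pvCharA_eq_pvG_table : ((List.range 127).all (fun n =>
    pvCharA (PySem.Chars.lowerChar (Char.ofNat n)) ==
      pvG (PySem.Chars.lowerChar (Char.ofNat n)))) = true := by rfl

theorem pvCharA_eq_pvG_of_ascii (d : Char) (h : d.toNat < 127) :
    pvCharA (PySem.Chars.lowerChar d) = pvG (PySem.Chars.lowerChar d) := by
  have := List.all_eq_true.mp pvCharA_eq_pvG_table d.toNat (List.mem_range.mpr h)
  rw [beq_iff_eq] at this
  rwa [Char.ofNat_toNat] at this

theorem foldA_eq (cs : List Char) (h : ∀ c ∈ cs, pvCharA c = pvG c) :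
    cs.foldl
      (fun acc char =>
        if PySem.Chars.isIn [char] ("abcdefghijklmnopqrstuvwxyz0123456789-".toList) then acc ++ [char]
        else if PySem.Chars.isalnum char then acc ++ [PySem.Chars.lowerChar char]
        else acc ++ ['-']) [] = cs.map pvG := by
  have hfun : (fun (acc : List Char) char =>
      if PySem.Chars.isIn [char] ("abcdefghijklmnopqrstuvwxyz0123456789-".toList) then acc ++ [char]
      else if PySem.Chars.isalnum char then acc ++ [PySem.Chars.lowerChar char]
      else acc ++ ['-']) = fun acc char => acc ++ [pvCharA char] := by
    funext a c
    simp only [pvCharA]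
    split_ifs <;> rfl
  rw [hfun, PySem.List.foldl_append_singleton_eq_map]
  simpa using List.map_congr_left h

theorem foldB_inv (cs : List Char) : ∀ (toks : List (List Char)) (buf : List Char),
    (if (cs.foldl
        (fun (st : List (List Char) × List Char) ch =>
          if PySem.Chars.isalnum ch then (st.1, st.2 ++ [ch])
          else if st.2.isEmpty then st else (st.1 ++ [st.2], ([] : List Char)))
        (toks, buf)).2.isEmpty
      then (cs.foldl
        (fun (st : List (List Char) × List Char) ch =>
          if PySem.Chars.isalnum ch then (st.1, st.2 ++ [ch])
          else if st.2.isEmpty then st else (st.1 ++ [st.2], ([] : List Char)))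
        (toks, buf)).1
      else (cs.foldl
        (fun (st : List (List Char) × List Char) ch =>
          if PySem.Chars.isalnum ch then (st.1, st.2 ++ [ch])
          else if st.2.isEmpty then st else (st.1 ++ [st.2], ([] : List Char)))
        (toks, buf)).1 ++ [(cs.foldl
        (fun (st : List (List Char) × List Char) ch =>
          if PySem.Chars.isalnum ch then (st.1, st.2 ++ [ch])
          else if st.2.isEmpty then st else (st.1 ++ [st.2], ([] : List Char)))
        (toks, buf)).2]) = toks ++ pvRuns buf cs := by
  induction cs with
  | nil =>
    intro toks buf
    simp only [List.foldl_nil, pvRuns]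
    cases buf <;> simp
  | cons c cs ih =>
    intro toks buf
    by_cases hc : PySem.Chars.isalnum c = true
    · simp only [List.foldl_cons, hc, if_pos, pvRuns]
      exact ih toks (buf ++ [c])
    · have hc' : PySem.Chars.isalnum c = false := by
        cases h : PySem.Chars.isalnum c
        · rfl
        · exact absurd h hc
      cases buf with
      | nil =>
        simp only [List.foldl_cons, hc', Bool.false_eq_true, if_false,
          List.isEmpty_nil, if_pos, pvRuns]
        simpa using ih toks []
      | cons b bs =>
        simp only [List.foldl_cons, hc', Bool.false_eq_true, if_false,
          List.isEmpty_cons, pvRuns]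
        rw [ih (toks ++ [b :: bs]) []]
        simp

theorem sanitize_main (raw : String) (hdom : Dom_sanitize_task_name_py raw) :
    sanitize_task_name_py raw = sanitize_task_name_py_alt raw := by
  have hchars : ∀ c ∈ PySem.Chars.lower raw.toList, pvCharA c = pvG c := by
    intro c hm
    simp only [PySem.Chars.lower, List.mem_map] at hm
    obtain ⟨d, hd, rfl⟩ := hm
    have hdc : pvDomChar d = true := by
      have := hdom
      unfold Dom_sanitize_task_name_py pvDomStr at this
      rw [List.all_eq_true] at this
      exact this d hd
    have h127 : d.toNat < 127 := by
      simp [pvDomChar] at hdc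
      omega
    exact pvCharA_eq_pvG_of_ascii d h127
  unfold sanitize_task_name_py sanitize_task_name_py_alt
  simp only []
  rw [foldA_eq _ hchars, splitOn_eq_pvSplitP, filter_splitP_strip, ← pvRuns_eq,
    foldB_inv (PySem.Chars.lower raw.toList) [] []]
  simp

-- ===== VERDICT (by name: the statement is the Claim_ definition above) =====
theorem sanitize_task_name_py_spec : Claim_equal_sanitize_task_name_py := by
  intro raw hdom _hpre
  unfold Spec_sanitize_task_name_py
  exact sanitize_main raw hdom
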